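-- pv_equiv track=rewrite | github.com/lorenzovngl/meta-hacker-cup | 2020/qualification_round/travel_restrictions/travel_restrictions.py | solve
-- ===== SOURCE A (Python) =====
-- def solve(N, I, O):
--     possible_flights = [['-' for i in range(N)] for j in range(N)]
--     for dep in range(N):
--         for arr in range(N):
--             if dep == arr:
--                 possible_flights[dep][arr] = 'Y'
--             elif abs(arr-dep) == 1:
--                 if O[dep] == 'N' or I[arr] == 'N':
--                     possible_flights[dep][arr] = 'N'
--                 else:
--                     possible_flights[dep][arr] = 'Y'
--     for dep in range(N):
--         for arr in range(N):
--             # To deduce if a flight from dep to arr is possible (when they are not adjacent) is necessary that the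
--             # chain of airports between them did not have a 'N'
--             if possible_flights[dep][arr] == '-':
--                 start = dep
--                 end = arr
--                 if dep < arr:
--                     step = 1
--                 else:
--                     step = -1
--                 string = ''
--                 for i in range(start, end, step):
--                     string = string + possible_flights[i][i+step]
--                 if not 'N' in string:
--                     possible_flights[dep][arr] = 'Y'
--                 else:
--                     possible_flights[dep][arr] = 'N'
--     result = ''
--     for dep in range(len(possible_flights)):
--         result += '\n'
--         for arr in range(len(possible_flights[dep])):
--             result += str(possible_flights[dep][arr])
--     return result
-- ===== SOURCE B (Python) =====
-- def solve(N, I, O):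
--     n = N if N > 0 else 0
--     # R[dep] = farthest airport reachable flying right; L[dep] = farthest reachable flying left.
--     # An adjacent hop dep->dep+1 works unless O[dep]=='N' or I[dep+1]=='N' (and symmetrically),
--     # so each row of the answer is a contiguous block of 'Y's: 'N'*L + 'Y'*(R-L+1) + 'N'*rest.
--     R = [0] * n
--     for dep in range(n - 1, -1, -1):
--         R[dep] = dep if (dep == n - 1 or O[dep] == 'N' or I[dep + 1] == 'N') else R[dep + 1]
--     L = [0] * n
--     for dep in range(n):
--         L[dep] = dep if (dep == 0 or O[dep] == 'N' or I[dep - 1] == 'N') else L[dep - 1]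
--     return ''.join('\n' + 'N' * L[dep] + 'Y' * (R[dep] - L[dep] + 1) + 'N' * (n - 1 - R[dep])
--                    for dep in range(n))
-- ===== Notes on version B (the rewrite author's own statement) =====
-- stated objective: faster
-- what changed: Replaces A's O(N) chain rescan per matrix cell with two linear passes computing the farthest airport reachable rightward and leftward from each airport, so every row is emitted as three repeated blocks 'N'*a+'Y'*b+'N'*c.
import Mathlib
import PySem

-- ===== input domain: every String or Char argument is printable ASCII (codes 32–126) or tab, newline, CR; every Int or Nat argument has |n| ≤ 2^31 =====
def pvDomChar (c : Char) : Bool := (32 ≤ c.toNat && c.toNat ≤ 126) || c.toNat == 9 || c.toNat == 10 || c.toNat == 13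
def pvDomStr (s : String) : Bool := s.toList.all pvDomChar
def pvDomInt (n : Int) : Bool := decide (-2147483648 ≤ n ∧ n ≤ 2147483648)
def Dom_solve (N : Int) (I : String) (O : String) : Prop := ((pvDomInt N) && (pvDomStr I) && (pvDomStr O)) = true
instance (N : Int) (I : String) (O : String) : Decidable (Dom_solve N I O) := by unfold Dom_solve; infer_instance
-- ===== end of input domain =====

-- B replaces A's per-pair chain scan over the mutable matrix by two linear passes that
-- compute the farthest airport reachable rightward/leftward from each airport, then emits
-- each row as three repeated blocks N…Y…N (objective: faster).

-- ===== PORT A =====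
-- matrix cell read m[i][j] / write m[i][j] = c (indices are in range wherever A runs them)
def pvGet (m : List (List Char)) (i j : Nat) : Char := (m.getD i []).getD j '-'
def pvSet (m : List (List Char)) (i j : Nat) (c : Char) : List (List Char) :=
  m.set i ((m.getD i []).set j c)
-- pass 1: the '-'-matrix comprehension plus the first double loop, which writes each
-- cell at most once with a value independent of the matrix: cell by cell, same branches
def pvInit (Ic Oc : List Char) (n : Nat) : List (List Char) :=
  (List.range n).map (fun (dep : Nat) => (List.range n).map (fun (arr : Nat) =>
    if dep == arr then 'Y'
    else if ((arr : Int) - (dep : Int)).natAbs == 1 then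
      (if Oc.getD dep ' ' == 'N' || Ic.getD arr ' ' == 'N' then 'N' else 'Y')
    else '-'))
-- the second double loop, row-major pairs (dep, arr)
def pvPairs (n : Nat) : List (Nat × Nat) := (List.range n).product (List.range n)
-- one body of the second double loop, mutating the matrix
-- (range(dep, arr, -1) is ported as the ascending range [arr+1 … dep] reversed — same elements, same order)
def pvStep (m : List (List Char)) (p : Nat × Nat) : List (List Char) :=
  if pvGet m p.1 p.2 == '-' then
    if 'N' ∈ (if p.1 < p.2 then
        (List.range' p.1 (p.2 - p.1)).foldl (fun str i => str ++ [pvGet m i (i + 1)]) []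
      else
        (List.range' (p.2 + 1) (p.1 - p.2)).reverse.foldl (fun str i => str ++ [pvGet m i (i - 1)]) [])
    then pvSet m p.1 p.2 'N' else pvSet m p.1 p.2 'Y'
  else m
-- the result loop: result += '\n' then the row's cells, using len(m) and len(m[dep])
def pvRender (m : List (List Char)) : List Char :=
  (List.range m.length).foldl (fun res dep =>
    (List.range (m.getD dep []).length).foldl (fun res arr => res ++ [pvGet m dep arr])
      (res ++ ['\n'])) []

def solve (N : Int) (I : String) (O : String) : String :=
  let n := N.toNat          -- range(N) is empty for N ≤ 0
  let Ic := I.toList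
  let Oc := O.toList
  String.ofList (pvRender ((pvPairs n).foldl (pvStep) (pvInit Ic Oc n)))

-- ===== PORT B =====
-- B: farthest-reachable index per direction (one backward and one forward pass), then each
-- row is three repeated blocks.  range(n-1,-1,-1) is (List.range n).reverse, exactly; the
-- arrays hold Python ints that are always indices 0..n-1, carried as Nat.
def pvRstep (Ic Oc : List Char) (n : Nat) (R : List Nat) (dep : Nat) : List Nat :=
  R.set dep (if dep == n - 1 || Oc.getD dep ' ' == 'N' || Ic.getD (dep + 1) ' ' == 'N'
             then dep else R.getD (dep + 1) 0)
def pvLstep (Ic Oc : List Char) (L : List Nat) (dep : Nat) : List Nat :=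
  L.set dep (if dep == 0 || Oc.getD dep ' ' == 'N' || Ic.getD (dep - 1) ' ' == 'N'
             then dep else L.getD (dep - 1) 0)

def solve_alt (N : Int) (I : String) (O : String) : String :=
  let n := (if N > 0 then N else 0).toNat
  let Ic := I.toList
  let Oc := O.toList
  let R := (List.range n).reverse.foldl (pvRstep Ic Oc n) (List.replicate n 0)
  let L := (List.range n).foldl (pvLstep Ic Oc) (List.replicate n 0)
  -- ''.join('\n' + 'N'*L[dep] + 'Y'*(R[dep]-L[dep]+1) + 'N'*(n-1-R[dep]) for dep in range(n))
  String.ofList ((List.range n).flatMap (fun dep =>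
    '\n' :: (List.replicate (L.getD dep 0) 'N' ++
      List.replicate (R.getD dep 0 - L.getD dep 0 + 1) 'Y' ++
      List.replicate (n - 1 - R.getD dep 0) 'N')))

-- ===== PRECONDITION & SPEC =====
-- Pre_solve is exactly where A returns: for N ≥ 2 it indexes O[dep] for every dep < N, and
-- I[arr] only when the short-circuiting 'O[dep] == N or …' reaches it; elsewhere A raises IndexError.
def Pre_solve (N : Int) (I : String) (O : String) : Prop :=
  N ≤ 1 ∨ (N.toNat ≤ O.toList.length ∧ ∀ arr : Nat, arr < N.toNat → I.toList.length ≤ arr →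
    (arr + 1 < N.toNat → O.toList.getD (arr + 1) ' ' = 'N') ∧
    (1 ≤ arr → O.toList.getD (arr - 1) ' ' = 'N'))
instance (N : Int) (I : String) (O : String) : Decidable (Pre_solve N I O) := by
  unfold Pre_solve; infer_instance
def pvWitness_solve : Int × String × String := (3, "YNY", "YYN")
def Spec_solve (N : Int) (I : String) (O : String) (out : String) : Prop := out = solve_alt N I O
instance (N : Int) (I : String) (O : String) (out : String) : Decidable (Spec_solve N I O out) := by unfold Spec_solve; infer_instance

-- ===== CLAIM (what is proved, stated in full; the proofs are below) =====
def Claim_equal_solve : Prop := ∀ (N : Int) (I : String) (O : String), Dom_solve N I O → Pre_solve N I O → Spec_solve N I O (solve N I O)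

-- ===== LEMMAS AND PROOFS =====

-- whether the adjacent flight i → i+1 (resp. j → j-1) is blocked
def pvBR (Ic Oc : List Char) (i : Nat) : Bool := Oc.getD i ' ' == 'N' || Ic.getD (i + 1) ' ' == 'N'
def pvBL (Ic Oc : List Char) (j : Nat) : Bool := Oc.getD j ' ' == 'N' || Ic.getD (j - 1) ' ' == 'N'

-- the common value of cell (d, a) in both programs
def pvG (Ic Oc : List Char) (d a : Nat) : Char :=
  if d = a then 'Y'
  else if d < a then (if (List.range' d (a - d)).any (pvBR Ic Oc) then 'N' else 'Y')
  else (if (List.range' (a + 1) (d - a)).any (pvBL Ic Oc) then 'N' else 'Y')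

lemma pvG_diag (Ic Oc : List Char) (d : Nat) : pvG Ic Oc d d = 'Y' := by simp [pvG]

lemma pvG_right (Ic Oc : List Char) (d : Nat) :
    pvG Ic Oc d (d + 1) = (if pvBR Ic Oc d then 'N' else 'Y') := by
  unfold pvG
  have h1 : d + 1 - d = 1 := by omega
  simp [h1, (by omega : d < d + 1)]

lemma pvG_left (Ic Oc : List Char) (a : Nat) :
    pvG Ic Oc (a + 1) a = (if pvBL Ic Oc (a + 1) then 'N' else 'Y') := by
  unfold pvG
  have h1 : a + 1 - a = 1 := by omega
  simp [h1, (by omega : ¬ a + 1 < a)]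

lemma pvG_ne_dash (Ic Oc : List Char) (d a : Nat) : pvG Ic Oc d a ≠ '-' := by
  unfold pvG; split_ifs <;> decide

-- the canonical rendering both sides reach
def pvOut (Ic Oc : List Char) (n : Nat) : List Char :=
  (List.range n).flatMap (fun d => '\n' :: (List.range n).map (pvG Ic Oc d))

-- ---- generic cell lemmas ----
lemma pvGet_pvSet_same (m : List (List Char)) (i j : Nat) (c : Char)
    (hi : i < m.length) (hj : j < (m.getD i []).length) :
    pvGet (pvSet m i j c) i j = c := by
  have hj' : j < m[i].length := by
    rwa [List.getD_eq_getElem?_getD, List.getElem?_eq_getElem hi] at hj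
  unfold pvGet pvSet
  simp only [List.getD_eq_getElem?_getD, List.getElem?_set]
  simp [hi, hj']

lemma pvGet_pvSet_ne (m : List (List Char)) (i j d a : Nat) (c : Char)
    (h : ¬(i = d ∧ j = a)) : pvGet (pvSet m i j c) d a = pvGet m d a := by
  unfold pvGet pvSet
  simp only [List.getD_eq_getElem?_getD, List.getElem?_set]
  by_cases hid : i = d
  · subst hid
    have hja : j ≠ a := fun e => h ⟨rfl, e⟩
    by_cases hi : i < m.length
    · simp [hi, hja]
    · simp [hi]
  · simp [hid]

-- ---- shape and invariant for A's second pass ----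
def pvInv (Ic Oc : List Char) (n : Nat) (m : List (List Char)) : Prop :=
  m.length = n ∧ (∀ r ∈ m, r.length = n) ∧
  ∀ d a : Nat, d < n → a < n → ((a : Int) - (d : Int)).natAbs ≤ 1 → pvGet m d a = pvG Ic Oc d a

lemma pvInit_get (Ic Oc : List Char) (n d a : Nat) (hd : d < n) (ha : a < n) :
    pvGet (pvInit Ic Oc n) d a =
      (if d = a then 'Y'
       else if ((a : Int) - (d : Int)).natAbs = 1 then
         (if Oc.getD d ' ' == 'N' || Ic.getD a ' ' == 'N' then 'N' else 'Y')
       else '-') := by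
  unfold pvGet pvInit
  simp [List.getD_eq_getElem?_getD, hd, ha]

lemma pvInv_init (Ic Oc : List Char) (n : Nat) : pvInv Ic Oc n (pvInit Ic Oc n) := by
  refine ⟨by simp [pvInit], by intro r hr; simp [pvInit] at hr; obtain ⟨d, _, rfl⟩ := hr; simp, ?_⟩
  intro d a hd ha habs
  rw [pvInit_get Ic Oc n d a hd ha]
  have : a = d ∨ a = d + 1 ∨ d = a + 1 := by omega
  rcases this with rfl | rfl | rfl
  · simp [pvG_diag]
  · rw [pvG_right]
    simp [(by omega : ((d + 1 : Int)) - (d : Int) = 1), pvBR]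
  · rw [pvG_left]
    have h2 : ((a : Int)) - ((a : Nat) + 1 : Nat) = -1 := by push_cast; ring
    simp [h2, pvBL]

lemma pvRowlen (Ic Oc : List Char) (n : Nat) (m : List (List Char)) (hm : pvInv Ic Oc n m)
    (i : Nat) (hi : i < n) : (m.getD i []).length = n := by
  obtain ⟨hlen, hrows, -⟩ := hm
  have him : i < m.length := by omega
  have : m.getD i [] ∈ m := by
    rw [List.getD_eq_getElem?_getD, List.getElem?_eq_getElem him]
    exact List.getElem_mem him
  exact hrows _ this

lemma pvChainN (q : Nat → Bool) (l : List Nat) :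
    ('N' ∈ l.map (fun i => if q i then 'N' else 'Y')) ↔ l.any q = true := by
  simp only [List.mem_map, List.any_eq_true]
  refine exists_congr fun i => and_congr_right fun _ => ?_
  split_ifs <;> simp_all

lemma pvChain_right (Ic Oc : List Char) (n : Nat) (m : List (List Char)) (hm : pvInv Ic Oc n m)
    (d a : Nat) (ha : a < n) (h : d < a) :
    (List.range' d (a - d)).foldl (fun str i => str ++ [pvGet m i (i + 1)]) [] =
      (List.range' d (a - d)).map (fun i => if pvBR Ic Oc i then 'N' else 'Y') := by
  rw [PySem.List.foldl_append_singleton_eq_map]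
  rw [List.nil_append]
  apply List.map_congr_left
  intro i hi
  rw [List.mem_range'] at hi
  have h1 : i < n := by omega
  have h2 : i + 1 < n := by omega
  have := hm.2.2 i (i + 1) h1 h2 (by simp [(by push_cast; ring : ((i + 1 : Nat) : Int) - (i : Int) = 1)])
  rw [this, pvG_right]

lemma pvG_left' (Ic Oc : List Char) (i : Nat) (h : 1 ≤ i) :
    pvG Ic Oc i (i - 1) = (if pvBL Ic Oc i then 'N' else 'Y') := by
  obtain ⟨j, rfl⟩ : ∃ j, i = j + 1 := ⟨i - 1, by omega⟩
  rw [(by omega : j + 1 - 1 = j), pvG_left]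

lemma pvChain_left (Ic Oc : List Char) (n : Nat) (m : List (List Char)) (hm : pvInv Ic Oc n m)
    (d a : Nat) (hd : d < n) (h : a < d) :
    (List.range' (a + 1) (d - a)).reverse.foldl (fun str i => str ++ [pvGet m i (i - 1)]) [] =
      (List.range' (a + 1) (d - a)).reverse.map (fun i => if pvBL Ic Oc i then 'N' else 'Y') := by
  rw [PySem.List.foldl_append_singleton_eq_map]
  rw [List.nil_append]
  apply List.map_congr_left
  intro i hi
  rw [List.mem_reverse, List.mem_range'] at hi
  have h1 : i < n := by omega
  have h2 : i - 1 < n := by omega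
  have habs : (((i - 1 : Nat) : Int) - (i : Int)).natAbs ≤ 1 := by omega
  rw [hm.2.2 i (i - 1) h1 h2 habs, pvG_left' Ic Oc i (by omega)]

lemma pvStep_get (Ic Oc : List Char) (n : Nat) (m : List (List Char)) (p : Nat × Nat)
    (hm : pvInv Ic Oc n m) (hp1 : p.1 < n) (hp2 : p.2 < n) (d a : Nat) (hd : d < n) (ha : a < n) :
    pvGet (pvStep m p) d a =
      if (d, a) = p then (if pvGet m d a = '-' then pvG Ic Oc d a else pvGet m d a)
      else pvGet m d a := by
  obtain ⟨p1, p2⟩ := p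
  simp only at hp1 hp2
  simp only [pvStep]
  by_cases hdash : pvGet m p1 p2 = '-'
  · rw [if_pos (by simp [hdash])]
    have hne : p1 ≠ p2 := by
      intro e
      have := hm.2.2 p1 p2 hp1 hp2 (by simp [e])
      exact pvG_ne_dash Ic Oc p1 p2 (this ▸ hdash)
    rw [← apply_ite (pvSet m p1 p2)]
    have hchar : (if 'N' ∈ (if p1 < p2 then
          (List.range' p1 (p2 - p1)).map (fun i => if pvBR Ic Oc i then 'N' else 'Y')
        else
          (List.range' (p2 + 1) (p1 - p2)).reverse.map (fun i => if pvBL Ic Oc i then 'N' else 'Y'))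
        then 'N' else 'Y') = pvG Ic Oc p1 p2 := by
      unfold pvG
      rw [if_neg hne]
      by_cases hlt : p1 < p2
      · rw [if_pos hlt, if_pos hlt]
        by_cases hany : (List.range' p1 (p2 - p1)).any (pvBR Ic Oc) = true
        · rw [if_pos ((pvChainN _ _).mpr hany), if_pos hany]
        · rw [if_neg (fun hmem => hany ((pvChainN _ _).mp hmem)), if_neg hany]
      · rw [if_neg hlt, if_neg hlt]
        by_cases hany : (List.range' (p2 + 1) (p1 - p2)).any (pvBL Ic Oc) = true
        · rw [if_pos ((pvChainN _ _).mpr (by rwa [List.any_reverse])), if_pos hany]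
        · rw [if_neg (fun hmem => hany (by rw [← List.any_reverse]; exact (pvChainN _ _).mp hmem)),
            if_neg hany]
    by_cases hlt : p1 < p2
    · rw [if_pos hlt, pvChain_right Ic Oc n m hm p1 p2 hp2 hlt]
      rw [if_pos hlt] at hchar
      rw [hchar]
      by_cases hp : (d, a) = (p1, p2)
      · obtain ⟨rfl, rfl⟩ := Prod.mk.injEq .. ▸ hp
        rw [pvGet_pvSet_same m _ _ _ (hm.1 ▸ hp1) ((pvRowlen Ic Oc n m hm _ hp1) ▸ hp2),
          if_pos rfl, if_pos hdash]
      · rw [pvGet_pvSet_ne m _ _ _ _ _ (fun ⟨e1, e2⟩ => hp (by rw [e1, e2])), if_neg hp]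
    · rw [if_neg hlt, pvChain_left Ic Oc n m hm p1 p2 hp1 (by omega)]
      rw [if_neg hlt] at hchar
      rw [hchar]
      by_cases hp : (d, a) = (p1, p2)
      · obtain ⟨rfl, rfl⟩ := Prod.mk.injEq .. ▸ hp
        rw [pvGet_pvSet_same m _ _ _ (hm.1 ▸ hp1) ((pvRowlen Ic Oc n m hm _ hp1) ▸ hp2),
          if_pos rfl, if_pos hdash]
      · rw [pvGet_pvSet_ne m _ _ _ _ _ (fun ⟨e1, e2⟩ => hp (by rw [e1, e2])), if_neg hp]
  · rw [if_neg (by simp [hdash])]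
    by_cases hp : (d, a) = (p1, p2)
    · obtain ⟨rfl, rfl⟩ := Prod.mk.injEq .. ▸ hp
      rw [if_pos rfl, if_neg hdash]
    · rw [if_neg hp]

lemma pvStep_shape (m : List (List Char)) (p : Nat × Nat) :
    pvStep m p = m ∨ ∃ c, pvStep m p = pvSet m p.1 p.2 c := by
  unfold pvStep
  split_ifs <;> first
    | exact Or.inl rfl
    | exact Or.inr ⟨'N', rfl⟩
    | exact Or.inr ⟨'Y', rfl⟩

lemma pvStep_inv (Ic Oc : List Char) (n : Nat) (m : List (List Char)) (p : Nat × Nat)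
    (hm : pvInv Ic Oc n m) (hp1 : p.1 < n) (hp2 : p.2 < n) :
    pvInv Ic Oc n (pvStep m p) := by
  refine ⟨?_, ?_, ?_⟩
  · rcases pvStep_shape m p with he | ⟨c, he⟩ <;> rw [he]
    · exact hm.1
    · simp [pvSet, hm.1]
  · rcases pvStep_shape m p with he | ⟨c, he⟩ <;> rw [he]
    · exact hm.2.1
    · intro r hr
      rcases List.mem_or_eq_of_mem_set hr with h | rfl
      · exact hm.2.1 r h
      · rw [List.length_set]
        exact pvRowlen Ic Oc n m hm p.1 hp1
  · intro d a hd ha habs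
    rw [pvStep_get Ic Oc n m p hm hp1 hp2 d a hd ha]
    by_cases hp : (d, a) = p
    · rw [if_pos hp, hm.2.2 d a hd ha habs]
      split_ifs <;> rfl
    · rw [if_neg hp]
      exact hm.2.2 d a hd ha habs

lemma pvFold_get (Ic Oc : List Char) (n : Nat) :
    ∀ (ps : List (Nat × Nat)) (m : List (List Char)), pvInv Ic Oc n m →
      (∀ p ∈ ps, p.1 < n ∧ p.2 < n) → ps.Nodup →
      (∀ d a : Nat, d < n → a < n →
        pvGet (ps.foldl pvStep m) d a =
          if (d, a) ∈ ps then (if pvGet m d a = '-' then pvG Ic Oc d a else pvGet m d a)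
          else pvGet m d a) ∧ pvInv Ic Oc n (ps.foldl pvStep m) := by
  intro ps
  induction ps with
  | nil => intro m hm _ _; exact ⟨fun d a _ _ => by simp, hm⟩
  | cons p ps ih =>
    intro m hm hall hnd
    have hp1 : p.1 < n := (hall p (List.mem_cons_self ..)).1
    have hp2 : p.2 < n := (hall p (List.mem_cons_self ..)).2
    have hm' : pvInv Ic Oc n (pvStep m p) := pvStep_inv Ic Oc n m p hm hp1 hp2
    have hall' : ∀ q ∈ ps, q.1 < n ∧ q.2 < n := fun q hq => hall q (List.mem_cons_of_mem _ hq)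
    have hnd' : ps.Nodup := (List.nodup_cons.mp hnd).2
    have hnotmem : p ∉ ps := (List.nodup_cons.mp hnd).1
    obtain ⟨ihget, ihinv⟩ := ih (pvStep m p) hm' hall' hnd'
    refine ⟨?_, by simpa using ihinv⟩
    intro d a hd ha
    rw [List.foldl_cons, ihget d a hd ha,
      pvStep_get Ic Oc n m p hm hp1 hp2 d a hd ha]
    by_cases hp : (d, a) = p
    · rw [if_neg (by rw [hp]; exact hnotmem), if_pos hp,
        if_pos (show (d, a) ∈ p :: ps by rw [hp]; exact List.mem_cons_self ..)]
    · rw [if_neg hp]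
      by_cases hmem : (d, a) ∈ ps
      · rw [if_pos hmem, if_pos (List.mem_cons_of_mem _ hmem)]
      · rw [if_neg hmem, if_neg (by simp [hp, hmem])]

lemma pvFinal_get (Ic Oc : List Char) (n : Nat) (d a : Nat) (hd : d < n) (ha : a < n) :
    pvGet ((pvPairs n).foldl pvStep (pvInit Ic Oc n)) d a = pvG Ic Oc d a := by
  have hall : ∀ p ∈ pvPairs n, p.1 < n ∧ p.2 < n := by
    intro p hp
    obtain ⟨p1, p2⟩ := p
    rw [pvPairs, List.pair_mem_product] at hp
    simpa using hp
  have hnd : (pvPairs n).Nodup := List.nodup_range.product List.nodup_range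
  have hmem : (d, a) ∈ pvPairs n := by
    rw [pvPairs, List.pair_mem_product]
    simp [hd, ha]
  rw [((pvFold_get Ic Oc n (pvPairs n) (pvInit Ic Oc n) (pvInv_init Ic Oc n) hall hnd).1
      d a hd ha), if_pos hmem]
  by_cases hadj : ((a : Int) - (d : Int)).natAbs ≤ 1
  · rw [(pvInv_init Ic Oc n).2.2 d a hd ha hadj,
      if_neg (pvG_ne_dash Ic Oc d a)]
  · rw [if_pos]
    rw [pvInit_get Ic Oc n d a hd ha,
      if_neg (by omega : ¬ d = a), if_neg (by omega : ¬ ((a : Int) - (d : Int)).natAbs = 1)]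

lemma pvRender_eq (Ic Oc : List Char) (n : Nat) (m : List (List Char))
    (hlen : m.length = n) (hrows : ∀ r ∈ m, r.length = n)
    (hget : ∀ d a : Nat, d < n → a < n → pvGet m d a = pvG Ic Oc d a) :
    pvRender m = pvOut Ic Oc n := by
  unfold pvRender pvOut
  rw [hlen]
  rw [PySem.List.foldl_congr_mem (List.range n) _
    (fun res dep => res ++ ('\n' :: (List.range n).map (pvG Ic Oc dep))) []
    ?_]
  · rw [PySem.List.foldl_append_eq_flatMap, List.nil_append]
  · intro res dep hdep
    rw [List.mem_range] at hdep
    have hrow : (m.getD dep []).length = n :=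
      pvRowlen Ic Oc n m ⟨hlen, hrows, fun d a hd ha _ => hget d a hd ha⟩ dep hdep
    rw [hrow, PySem.List.foldl_append_singleton_eq_map]
    rw [List.map_congr_left (fun a hac => hget dep a hdep (List.mem_range.mp hac))]
    simp

lemma solve_eq_pvOut (N : Int) (I O : String) :
    solve N I O = String.ofList (pvOut I.toList O.toList N.toNat) := by
  simp only [solve]
  have hinv := pvFold_get I.toList O.toList N.toNat (pvPairs N.toNat)
    (pvInit I.toList O.toList N.toNat) (pvInv_init ..)
    (by
      intro p hp
      obtain ⟨p1, p2⟩ := p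
      rw [pvPairs, List.pair_mem_product] at hp
      simpa using hp)
    (List.nodup_range.product List.nodup_range)
  congr 1
  exact pvRender_eq I.toList O.toList N.toNat _ hinv.2.1 hinv.2.2.1
    (fun d a hd ha => pvFinal_get I.toList O.toList N.toNat d a hd ha)

-- ---- B's side ----
-- the mathematical farthest-reachable functions the two passes compute
def pvRfun (Ic Oc : List Char) (n dep : Nat) : Nat :=
  if h : dep + 1 < n ∧ pvBR Ic Oc dep = false then pvRfun Ic Oc n (dep + 1) else dep
termination_by n - dep
decreasing_by omega

def pvLfun (Ic Oc : List Char) (dep : Nat) : Nat :=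
  if h : 1 ≤ dep ∧ pvBL Ic Oc dep = false then pvLfun Ic Oc (dep - 1) else dep
termination_by dep
decreasing_by omega

lemma pvNatGetD_set_same (l : List Nat) (i : Nat) (v : Nat) (h : i < l.length) :
    (l.set i v).getD i 0 = v := by
  simp [List.getD_eq_getElem?_getD, List.getElem?_set, h]

lemma pvNatGetD_set_ne (l : List Nat) (i j : Nat) (v : Nat) (h : i ≠ j) :
    (l.set i v).getD j 0 = l.getD j 0 := by
  simp [List.getD_eq_getElem?_getD, List.getElem?_set, h]

-- properties of pvRfun / pvLfun
lemma pvRfun_spec (Ic Oc : List Char) (n dep : Nat) (hd : dep < n) :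
    dep ≤ pvRfun Ic Oc n dep ∧ pvRfun Ic Oc n dep < n ∧
    (∀ i, dep ≤ i → i < pvRfun Ic Oc n dep → pvBR Ic Oc i = false) ∧
    (pvRfun Ic Oc n dep = n - 1 ∨ pvBR Ic Oc (pvRfun Ic Oc n dep) = true) := by
  induction dep using pvRfun.induct Ic Oc n with
  | case1 dep h ih =>
    rw [pvRfun, dif_pos h]
    obtain ⟨h1, h2, h3, h4⟩ := ih (by omega)
    refine ⟨by omega, h2, ?_, h4⟩
    intro i hi1 hi2
    by_cases he : i = dep
    · subst he; exact h.2
    · exact h3 i (by omega) hi2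
  | case2 dep h =>
    rw [pvRfun, dif_neg h]
    refine ⟨le_refl _, hd, fun i h1 h2 => by omega, ?_⟩
    rcases Decidable.not_and_iff_or_not.mp h with h' | h'
    · left; omega
    · right; simpa using h'

lemma pvLfun_spec (Ic Oc : List Char) (dep : Nat) :
    pvLfun Ic Oc dep ≤ dep ∧
    (∀ j, pvLfun Ic Oc dep < j → j ≤ dep → pvBL Ic Oc j = false) ∧
    (pvLfun Ic Oc dep = 0 ∨ pvBL Ic Oc (pvLfun Ic Oc dep) = true) := by
  induction dep using pvLfun.induct Ic Oc with
  | case1 dep h ih =>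
    rw [pvLfun, dif_pos h]
    obtain ⟨h1, h2, h3⟩ := ih
    refine ⟨by omega, ?_, h3⟩
    intro j hj1 hj2
    by_cases he : j = dep
    · subst he; exact h.2
    · exact h2 j hj1 (by omega)
  | case2 dep h =>
    rw [pvLfun, dif_neg h]
    refine ⟨le_refl _, fun j h1 h2 => by omega, ?_⟩
    rcases Decidable.not_and_iff_or_not.mp h with h' | h'
    · left; omega
    · right; simpa using h'

-- the reachability criteria
lemma pvRfun_iff (Ic Oc : List Char) (n dep arr : Nat) (hd : dep < n) (ha : arr < n)
    (hlt : dep < arr) :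
    ((List.range' dep (arr - dep)).any (pvBR Ic Oc) = true) ↔ pvRfun Ic Oc n dep < arr := by
  obtain ⟨h1, h2, h3, h4⟩ := pvRfun_spec Ic Oc n dep hd
  constructor
  · intro hany
    obtain ⟨i, hi, hb⟩ := List.any_eq_true.mp hany
    rw [List.mem_range'_1] at hi
    by_contra hle
    rw [h3 i (by omega) (by omega)] at hb
    exact absurd hb (by simp)
  · intro hlt'
    rcases h4 with h4 | h4
    · omega
    · exact List.any_eq_true.mpr ⟨pvRfun Ic Oc n dep, List.mem_range'_1.mpr (by omega), h4⟩

lemma pvLfun_iff (Ic Oc : List Char) (dep arr : Nat) (hlt : arr < dep) :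
    ((List.range' (arr + 1) (dep - arr)).any (pvBL Ic Oc) = true) ↔ arr < pvLfun Ic Oc dep := by
  obtain ⟨h1, h2, h3⟩ := pvLfun_spec Ic Oc dep
  constructor
  · intro hany
    obtain ⟨j, hj, hb⟩ := List.any_eq_true.mp hany
    rw [List.mem_range'_1] at hj
    by_contra hle
    rw [h2 j (by omega) (by omega)] at hb
    exact absurd hb (by simp)
  · intro hlt'
    refine List.any_eq_true.mpr ⟨pvLfun Ic Oc dep, List.mem_range'_1.mpr (by omega), ?_⟩
    rcases h3 with h3 | h3
    · omega
    · exact h3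

-- the two passes compute pvRfun / pvLfun
lemma pvRpass (Ic Oc : List Char) (n : Nat) :
    ∀ t : Nat, t ≤ n →
      ((List.range' (n - t) t).reverse.foldl (pvRstep Ic Oc n) (List.replicate n 0)).length = n ∧
      ∀ dep : Nat, n - t ≤ dep → dep < n →
        ((List.range' (n - t) t).reverse.foldl (pvRstep Ic Oc n) (List.replicate n 0)).getD dep 0 =
          pvRfun Ic Oc n dep := by
  intro t
  induction t with
  | zero => exact fun _ => ⟨by simp, fun dep h1 h2 => by omega⟩
  | succ t ih =>
    intro ht
    obtain ⟨ihl, ihv⟩ := ih (by omega)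
    have hrr : List.range' (n - (t + 1)) (t + 1) = (n - (t + 1)) :: List.range' (n - t) t := by
      rw [List.range'_succ, (by omega : n - (t + 1) + 1 = n - t)]
    rw [hrr, List.reverse_cons, List.foldl_append, List.foldl_cons, List.foldl_nil]
    set prev := (List.range' (n - t) t).reverse.foldl (pvRstep Ic Oc n) (List.replicate n 0)
      with hprev
    have hlenp : prev.length = n := ihl
    refine ⟨by simp [pvRstep, hlenp], ?_⟩
    intro dep h1 h2
    by_cases he : dep = n - (t + 1)
    · subst he
      unfold pvRstep
      rw [pvNatGetD_set_same _ _ _ (by omega)]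
      by_cases hc : ((n - (t + 1) == n - 1) || (Oc.getD (n - (t + 1)) ' ' == 'N')
          || (Ic.getD (n - (t + 1) + 1) ' ' == 'N')) = true
      · rw [if_pos hc]
        have hnc : ¬(n - (t + 1) + 1 < n ∧ pvBR Ic Oc (n - (t + 1)) = false) := by
          simp only [Bool.or_eq_true] at hc
          rcases hc with (hc | hc) | hc
          · intro h
            rw [beq_iff_eq] at hc
            omega
          · rintro ⟨-, h2⟩
            unfold pvBR at h2
            rw [hc] at h2
            simp at h2
          · rintro ⟨-, h2⟩
            unfold pvBR at h2
            rw [hc] at h2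
            simp at h2
        rw [pvRfun, dif_neg hnc]
      · rw [if_neg hc]
        have hb : ((n - (t + 1) == n - 1) || (Oc.getD (n - (t + 1)) ' ' == 'N')
            || (Ic.getD (n - (t + 1) + 1) ' ' == 'N')) = false := by
          simpa using hc
        simp only [Bool.or_eq_false_iff] at hb
        obtain ⟨⟨hA, hB⟩, hC⟩ := hb
        have hA' : n - (t + 1) ≠ n - 1 := by simpa using hA
        rw [pvRfun, dif_pos ⟨by omega, by unfold pvBR; simp only [Bool.or_eq_false_iff]; exact ⟨hB, hC⟩⟩,
          ihv (n - (t + 1) + 1) (by omega) (by omega)]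
    · unfold pvRstep
      rw [pvNatGetD_set_ne _ _ _ _ (fun e => he e.symm)]
      exact ihv dep (by omega) h2

lemma pvLpass (Ic Oc : List Char) (n : Nat) :
    ∀ t : Nat, t ≤ n →
      ((List.range' 0 t).foldl (pvLstep Ic Oc) (List.replicate n 0)).length = n ∧
      ∀ dep : Nat, dep < t →
        ((List.range' 0 t).foldl (pvLstep Ic Oc) (List.replicate n 0)).getD dep 0 =
          pvLfun Ic Oc dep := by
  intro t
  induction t with
  | zero => exact fun _ => ⟨by simp, fun dep h1 => by omega⟩
  | succ t ih =>
    intro ht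
    obtain ⟨ihl, ihv⟩ := ih (by omega)
    rw [(by rw [List.range'_concat]; simp : List.range' 0 (t + 1) = List.range' 0 t ++ [t]),
      List.foldl_append, List.foldl_cons, List.foldl_nil]
    set prevL := (List.range' 0 t).foldl (pvLstep Ic Oc) (List.replicate n 0) with hprevL
    have hlenp : prevL.length = n := ihl
    refine ⟨by simp [pvLstep, hlenp], ?_⟩
    intro dep h1
    by_cases he : dep = t
    · subst he
      unfold pvLstep
      rw [pvNatGetD_set_same _ _ _ (by omega)]
      by_cases hc : ((dep == 0) || (Oc.getD dep ' ' == 'N') || (Ic.getD (dep - 1) ' ' == 'N')) = true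
      · rw [if_pos hc]
        have hnc : ¬(1 ≤ dep ∧ pvBL Ic Oc dep = false) := by
          simp only [Bool.or_eq_true] at hc
          rcases hc with (hc | hc) | hc
          · intro h
            rw [beq_iff_eq] at hc
            omega
          · rintro ⟨-, h2⟩
            unfold pvBL at h2
            rw [hc] at h2
            simp at h2
          · rintro ⟨-, h2⟩
            unfold pvBL at h2
            rw [hc] at h2
            simp at h2
        rw [pvLfun, dif_neg hnc]
      · rw [if_neg hc]
        have hb : ((dep == 0) || (Oc.getD dep ' ' == 'N') || (Ic.getD (dep - 1) ' ' == 'N'))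
            = false := by
          simpa using hc
        simp only [Bool.or_eq_false_iff] at hb
        obtain ⟨⟨hA, hB⟩, hC⟩ := hb
        have hA' : dep ≠ 0 := by simpa using hA
        rw [pvLfun, dif_pos ⟨by omega, by unfold pvBL; simp only [Bool.or_eq_false_iff]; exact ⟨hB, hC⟩⟩,
          ihv (dep - 1) (by omega)]
    · unfold pvLstep
      rw [pvNatGetD_set_ne _ _ _ _ (fun e => he e.symm)]
      exact ihv dep (by omega)

lemma pvRpass_final (Ic Oc : List Char) (n dep : Nat) (hd : dep < n) :
    ((List.range n).reverse.foldl (pvRstep Ic Oc n) (List.replicate n 0)).getD dep 0 =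
      pvRfun Ic Oc n dep := by
  have h := (pvRpass Ic Oc n n (le_refl n)).2 dep (by omega) hd
  rw [(by omega : n - n = 0)] at h
  rw [List.range_eq_range']
  exact h

lemma pvLpass_final (Ic Oc : List Char) (n dep : Nat) (hd : dep < n) :
    ((List.range n).foldl (pvLstep Ic Oc) (List.replicate n 0)).getD dep 0 =
      pvLfun Ic Oc dep := by
  rw [List.range_eq_range']
  exact (pvLpass Ic Oc n n (le_refl n)).2 dep hd

-- one row of B equals one row of the canonical output
lemma pvThreeBlocks (a b c : Nat) (i : Nat) (hi : i < a + b + c) :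
    (List.replicate a 'N' ++ List.replicate b 'Y' ++ List.replicate c 'N')[i]'(by simp; omega) =
      if i < a then 'N' else if i < a + b then 'Y' else 'N' := by
  by_cases h1 : i < a
  · rw [List.getElem_append_left (by simp; omega), List.getElem_append_left (by simp; omega),
      List.getElem_replicate, if_pos h1]
  · by_cases h2 : i < a + b
    · rw [List.getElem_append_left (by simp; omega)]
      rw [List.getElem_append_right (by simp; omega)]
      rw [List.getElem_replicate, if_neg h1, if_pos h2]
    · rw [List.getElem_append_right (by simp; omega)]
      rw [List.getElem_replicate, if_neg h1, if_neg h2]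

lemma pvRowEq (Ic Oc : List Char) (n dep : Nat) (hd : dep < n) :
    List.replicate (pvLfun Ic Oc dep) 'N' ++
      List.replicate (pvRfun Ic Oc n dep - pvLfun Ic Oc dep + 1) 'Y' ++
      List.replicate (n - 1 - pvRfun Ic Oc n dep) 'N' =
    (List.range n).map (pvG Ic Oc dep) := by
  obtain ⟨hr1, hr2, -, -⟩ := pvRfun_spec Ic Oc n dep hd
  obtain ⟨hl1, -, -⟩ := pvLfun_spec Ic Oc dep
  have hL : pvLfun Ic Oc dep ≤ dep := hl1
  have hlen : pvLfun Ic Oc dep + (pvRfun Ic Oc n dep - pvLfun Ic Oc dep + 1) +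
      (n - 1 - pvRfun Ic Oc n dep) = n := by omega
  apply List.ext_getElem
  · simp; omega
  · intro arr h1 h2
    rw [List.getElem_map, List.getElem_range]
    have h1' : arr < pvLfun Ic Oc dep + (pvRfun Ic Oc n dep - pvLfun Ic Oc dep + 1) +
        (n - 1 - pvRfun Ic Oc n dep) := by
      have := h1
      simp [List.length_append, List.length_replicate] at this
      omega
    rw [pvThreeBlocks _ _ _ arr h1']
    have harr : arr < n := by simpa using h2
    by_cases he : dep = arr
    · subst he
      rw [if_neg (by omega), if_pos (by omega), pvG_diag]
    · unfold pvG
      rw [if_neg he]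
      by_cases hlt : dep < arr
      · rw [if_pos hlt]
        by_cases hany : (List.range' dep (arr - dep)).any (pvBR Ic Oc) = true
        · have := (pvRfun_iff Ic Oc n dep arr hd harr hlt).mp hany
          rw [if_pos hany, if_neg (by omega), if_neg (by omega)]
        · have := (pvRfun_iff Ic Oc n dep arr hd harr hlt).not.mp hany
          rw [if_neg hany, if_neg (by omega), if_pos (by omega)]
      · have hgt : arr < dep := by omega
        rw [if_neg hlt]
        by_cases hany : (List.range' (arr + 1) (dep - arr)).any (pvBL Ic Oc) = true
        · have := (pvLfun_iff Ic Oc dep arr hgt).mp hany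
          rw [if_pos hany, if_pos (by omega)]
        · have := (pvLfun_iff Ic Oc dep arr hgt).not.mp hany
          rw [if_neg hany, if_neg (by omega), if_pos (by omega)]

lemma solve_alt_eq_pvOut (N : Int) (I O : String) :
    solve_alt N I O = String.ofList (pvOut I.toList O.toList N.toNat) := by
  simp only [solve_alt]
  rw [(by split_ifs <;> omega : (if N > 0 then N else 0).toNat = N.toNat)]
  set n := N.toNat with hn
  congr 1
  unfold pvOut
  rw [List.flatMap_def, List.flatMap_def]
  refine congrArg List.flatten (List.map_congr_left ?_)
  intro dep hdep
  rw [List.mem_range] at hdep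
  rw [pvRpass_final I.toList O.toList n dep hdep, pvLpass_final I.toList O.toList n dep hdep]
  exact congrArg (List.cons '\n') (pvRowEq I.toList O.toList n dep hdep)


-- ===== VERDICT (by name: the statement is the Claim_ definition above) =====
theorem solve_spec : Claim_equal_solve := by
  intro N I O _ _
  unfold Spec_solve
  rw [solve_eq_pvOut, solve_alt_eq_pvOut]
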